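-- pv_equiv track=rewrite | github.com/facundoschillino/TP_IA_GRUPO1 | entrega2.py | solo_4
-- ===== SOURCE A (Python) =====
-- def solo_4(vars, vals):
--     colores = {}
--     for valor in vals:
--         if valor in colores:
--             colores[valor] += 1
--         else:
--             colores[valor] = 1
--     for conteo in colores.values():
--         if conteo > 4:
--             return False
--     return True
-- ===== SOURCE B (Python) =====
-- def solo_4(vars, vals):
--     prev = None
--     run = 0
--     for v in sorted(vals):
--         if prev is not None and v == prev:
--             run += 1
--         else:
--             prev = v
--             run = 1
--         if run > 4:
--             return False
--     return True
-- ===== Notes on version B (the rewrite author's own statement) =====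
-- stated objective: alternative
-- what changed: B replaces A's dict-counting pass plus a second pass over the counts by sorting a copy of vals and making one run-length scan over the sorted list, returning False as soon as a run of equal values exceeds 4.
import Mathlib
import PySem

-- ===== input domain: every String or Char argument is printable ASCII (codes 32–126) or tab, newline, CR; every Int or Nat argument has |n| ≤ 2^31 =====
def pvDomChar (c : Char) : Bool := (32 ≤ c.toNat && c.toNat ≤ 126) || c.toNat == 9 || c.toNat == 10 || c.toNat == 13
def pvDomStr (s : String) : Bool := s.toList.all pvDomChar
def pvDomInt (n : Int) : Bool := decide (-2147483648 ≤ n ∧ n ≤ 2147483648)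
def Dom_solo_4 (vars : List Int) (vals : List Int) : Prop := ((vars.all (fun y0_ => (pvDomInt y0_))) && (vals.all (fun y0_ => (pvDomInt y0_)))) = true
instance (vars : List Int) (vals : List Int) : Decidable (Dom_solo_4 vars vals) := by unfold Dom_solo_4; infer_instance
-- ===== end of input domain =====

-- B replaces the dict-counting two-pass check by a single run-length scan over a sorted copy of vals (objective: alternative decomposition; not faster).


-- ===== PORT A =====
-- first loop of A: build the dict of counts (branch order as in the Python)
def pvStepA (d : PySem.Dict Int Int) (valor : Int) : PySem.Dict Int Int :=
  if d.contains valor then d.modify valor 0 (· + 1) else d.insert valor 1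

-- second loop of A: early return False on a count > 4
def pvCheckA : List Int → Bool
  | [] => true
  | conteo :: rest => if conteo > 4 then false else pvCheckA rest

def solo_4 (vars : List Int) (vals : List Int) : Bool :=
  let colores := vals.foldl pvStepA PySem.Dict.empty
  pvCheckA colores.values

-- ===== PORT B =====
-- B's loop: run-length scan over the sorted values with early return False
def pvRunB : Option Int → Int → List Int → Bool
  | _, _, [] => true
  | prev, run, v :: rest =>
    let run' := if prev = some v then run + 1 else 1
    if run' > 4 then false else pvRunB (some v) run' rest

def solo_4_alt (vars : List Int) (vals : List Int) : Bool :=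
  pvRunB none 0 (PySem.List.sorted vals (fun x => x) false)

-- ===== PRECONDITION & SPEC =====
def Spec_solo_4 (vars : List Int) (vals : List Int) (out : Bool) : Prop := out = solo_4_alt vars vals
instance (vars : List Int) (vals : List Int) (out : Bool) : Decidable (Spec_solo_4 vars vals out) := by unfold Spec_solo_4; infer_instance

-- ===== CLAIM (what is proved, stated in full; the proofs are below) =====
def Claim_equal_solo_4 : Prop := ∀ (vars : List Int) (vals : List Int), Dom_solo_4 vars vals → Spec_solo_4 vars vals (solo_4 vars vals)

-- ===== LEMMAS AND PROOFS =====

-- A's branchy counting step is exactly Counter's step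
theorem pvStepA_eq_modify : pvStepA = fun (d : PySem.Dict Int Int) v => d.modify v 0 (· + 1) := by
  funext d v
  unfold pvStepA
  by_cases h : d.contains v = true
  · simp [h]
  · have hn : d.get? v = none := by
      rw [PySem.Dict.get?_eq_none_iff_contains]; simpa using h
    simp [h, PySem.Dict.modify, PySem.Dict.getD, hn]

-- A's second loop is an all-check
theorem pvCheckA_eq_all (l : List Int) : pvCheckA l = l.all (fun c => decide (c ≤ 4)) := by
  induction l with
  | nil => rfl
  | cons c rest ih =>
    by_cases h : c > 4
    · simp [pvCheckA, h]
    · have h4 : c ≤ 4 := by omega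
      simp [pvCheckA, h, h4, ih]

-- characterisation of A: true iff every value occurs at most 4 times
theorem solo_4_char (vars vals : List Int) :
    solo_4 vars vals = true ↔ ∀ x ∈ vals, ((vals.count x : Int) ≤ 4) := by
  unfold solo_4
  rw [pvStepA_eq_modify]
  have hc : vals.foldl (fun (d : PySem.Dict Int Int) v => d.modify v 0 (· + 1)) PySem.Dict.empty
      = PySem.Dict.counter vals := (PySem.Dict.counter_eq_foldl vals).symm
  rw [hc, pvCheckA_eq_all,
    PySem.Dict.values_eq_map_keys (PySem.Dict.counter vals) (PySem.Dict.nodup_keys_counter vals) 0,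
    PySem.Dict.keys_counter]
  simp only [List.all_map, List.all_eq_true, PySem.Dict.getD_counter]
  constructor
  · intro h x hx
    simpa using h x ((PySem.Set.mem_ofList vals x).mpr hx)
  · intro h x hx
    simpa using h x ((PySem.Set.mem_ofList vals x).mp hx)

-- B's scan, started inside a run of p with run length c already seen (c ≤ 4), over a sorted tail
theorem pvRunB_some (s : List Int) : ∀ (p c : Int), s.Pairwise (· ≤ ·) → (∀ x ∈ s, p ≤ x) → c ≤ 4 →
    (pvRunB (some p) c s = true ↔
      (c + (s.count p : Int) ≤ 4 ∧ ∀ x ∈ s, x ≠ p → ((s.count x : Int) ≤ 4))) := by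
  induction s with
  | nil => intro p c _ _ hc; simp [pvRunB]; omega
  | cons v rest ih =>
    intro p c hsort hmin hc
    have hsort' : rest.Pairwise (· ≤ ·) := hsort.of_cons
    have hvmin : ∀ x ∈ rest, v ≤ x := fun x hx => (List.pairwise_cons.mp hsort).1 x hx
    by_cases hv : p = v
    · subst hv
      by_cases h4 : c + 1 > 4
      · have : pvRunB (some p) c (p :: rest) = false := by
          simp only [pvRunB]; simp [h4]
        rw [this]
        have hcnt : (0:Int) ≤ rest.count p := by positivity
        simp [List.count_cons_self]
        intro _; omega
      · have hstep : pvRunB (some p) c (p :: rest) = pvRunB (some p) (c + 1) rest := by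
          simp only [pvRunB]; simp [h4]
        rw [hstep, ih p (c + 1) hsort' hvmin (by omega)]
        constructor
        · rintro ⟨h1, h2⟩
          refine ⟨by rw [List.count_cons_self]; push_cast; omega, ?_⟩
          intro x hx hxp
          rcases List.mem_cons.mp hx with h | h
          · exact absurd h hxp
          · rw [List.count_cons_of_ne (Ne.symm hxp)]; exact h2 x h hxp
        · rintro ⟨h1, h2⟩
          refine ⟨by rw [List.count_cons_self] at h1; push_cast at h1 ⊢; omega, ?_⟩
          intro x hx hxp
          have := h2 x (List.mem_cons_of_mem p hx) hxp
          rwa [List.count_cons_of_ne (Ne.symm hxp)] at this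
    · have hpv : p < v := lt_of_le_of_ne (hmin v List.mem_cons_self) hv
      have hnp : ∀ x ∈ rest, x ≠ p := fun x hx => by have := hvmin x hx; omega
      have hcnt0 : (v :: rest).count p = 0 := by
        rw [List.count_eq_zero]
        intro hmem
        rcases List.mem_cons.mp hmem with h | h
        · omega
        · exact (hnp p h) rfl
      have hstep : pvRunB (some p) c (v :: rest) = pvRunB (some v) 1 rest := by
        simp only [pvRunB]
        have : (some p = some v) = False := by simp [hv]
        simp [this]
      rw [hstep, ih v 1 hsort' hvmin (by omega)]
      constructor
      · rintro ⟨h1, h2⟩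
        refine ⟨by rw [hcnt0]; push_cast; omega, ?_⟩
        intro x hx hxp
        rcases List.mem_cons.mp hx with h | h
        · subst h; rw [List.count_cons_self]; push_cast; omega
        · by_cases hxv : x = v
          · subst hxv; rw [List.count_cons_self]; push_cast; omega
          · rw [List.count_cons_of_ne (Ne.symm hxv)]; exact h2 x h hxv
      · rintro ⟨h1, h2⟩
        have hv' := h2 v List.mem_cons_self (Ne.symm hv)
        rw [List.count_cons_self] at hv'
        refine ⟨by push_cast at hv' ⊢; omega, ?_⟩
        intro x hx hxv
        have hxp : x ≠ p := hnp x hx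
        have := h2 x (List.mem_cons_of_mem v hx) hxp
        rwa [List.count_cons_of_ne (Ne.symm hxv)] at this

-- characterisation of B's scan on a sorted list
theorem pvRunB_char (s : List Int) (hsort : s.Pairwise (· ≤ ·)) :
    pvRunB none 0 s = true ↔ ∀ x ∈ s, ((s.count x : Int) ≤ 4) := by
  cases s with
  | nil => simp [pvRunB]
  | cons v rest =>
    have hsort' : rest.Pairwise (· ≤ ·) := hsort.of_cons
    have hvmin : ∀ x ∈ rest, v ≤ x := fun x hx => (List.pairwise_cons.mp hsort).1 x hx
    have hstep : pvRunB none 0 (v :: rest) = pvRunB (some v) 1 rest := by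
      simp [pvRunB]
    rw [hstep, pvRunB_some rest v 1 hsort' hvmin (by omega)]
    constructor
    · rintro ⟨h1, h2⟩
      intro x hx
      rcases List.mem_cons.mp hx with h | h
      · subst h; rw [List.count_cons_self]; push_cast; omega
      · by_cases hxv : x = v
        · subst hxv; rw [List.count_cons_self]; push_cast; omega
        · rw [List.count_cons_of_ne (Ne.symm hxv)]; exact h2 x h hxv
    · intro h
      have hv := h v List.mem_cons_self
      rw [List.count_cons_self] at hv
      refine ⟨by push_cast at hv ⊢; omega, ?_⟩
      intro x hx hxv
      have := h x (List.mem_cons_of_mem v hx)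
      rwa [List.count_cons_of_ne (Ne.symm hxv)] at this

-- characterisation of B: same condition, transported along the sort's permutation
theorem solo_4_alt_char (vars vals : List Int) :
    solo_4_alt vars vals = true ↔ ∀ x ∈ vals, ((vals.count x : Int) ≤ 4) := by
  unfold solo_4_alt
  have hperm : (PySem.List.sorted vals (fun x => x) false).Perm vals :=
    PySem.List.sorted_perm vals (fun x => x) false
  have hsort : (PySem.List.sorted vals (fun x => x) false).Pairwise (· ≤ ·) := by
    simpa using PySem.List.sorted_pairwise vals (fun x => x)
  rw [pvRunB_char _ hsort]
  constructor
  · intro h x hx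
    have := h x (hperm.mem_iff.mpr hx)
    rwa [hperm.count_eq] at this
  · intro h x hx
    rw [hperm.count_eq]
    exact h x (hperm.mem_iff.mp hx)

-- ===== VERDICT (by name: the statement is the Claim_ definition above) =====
theorem solo_4_spec : Claim_equal_solo_4 := by
  intro vars vals _
  unfold Spec_solo_4
  rw [Bool.eq_iff_iff, solo_4_char vars vals, solo_4_alt_char vars vals]
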